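-- pv_equiv track=rewrite | github.com/Elon128/ICSE | Tasks/Week 3/searching_books.py | search_binary_cmp_count
-- ===== SOURCE A (Python) =====
-- def search_binary_cmp_count(a: list[str], item: str) -> int:
--     """Count comparisons in a binary search for the item in a sorted list."""
--
--     comparisons = 0
--     left, right = 0, len(a) - 1
--
--     while left <= right:
--         mid = (left + right) // 2
--         comparisons += 1
--
--         if a[mid] == item:
--             return comparisons  # Return comparisons if item is found
--         elif a[mid] < item:
--             comparisons += 1
--             left = mid + 1
--         else:
--             comparisons += 1
--             right = mid - 1
--
--     return comparisons  # Return total comparisons if item is not found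
-- ===== SOURCE B (Python) =====
-- def search_binary_cmp_count(a: list[str], item: str) -> int:
--     """Count comparisons in a binary search: recurse on the sublist itself,
--     splitting it at its middle element with slicing."""
--     def go(seg: list[str]) -> int:
--         if not seg:
--             return 0
--         m = (len(seg) - 1) // 2
--         x = seg[m]
--         if x == item:
--             return 1
--         if x < item:
--             return 2 + go(seg[m + 1:])
--         return 2 + go(seg[:m])
--     return go(a)
-- ===== Notes on version B (the rewrite author's own statement) =====
-- stated objective: alternative
-- what changed: Replaced the index-based accumulator loop by a recursion on the sublist itself: each step slices the list at its middle element and returns 1 on a hit or 2 plus the cost of the chosen half.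
import Mathlib
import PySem

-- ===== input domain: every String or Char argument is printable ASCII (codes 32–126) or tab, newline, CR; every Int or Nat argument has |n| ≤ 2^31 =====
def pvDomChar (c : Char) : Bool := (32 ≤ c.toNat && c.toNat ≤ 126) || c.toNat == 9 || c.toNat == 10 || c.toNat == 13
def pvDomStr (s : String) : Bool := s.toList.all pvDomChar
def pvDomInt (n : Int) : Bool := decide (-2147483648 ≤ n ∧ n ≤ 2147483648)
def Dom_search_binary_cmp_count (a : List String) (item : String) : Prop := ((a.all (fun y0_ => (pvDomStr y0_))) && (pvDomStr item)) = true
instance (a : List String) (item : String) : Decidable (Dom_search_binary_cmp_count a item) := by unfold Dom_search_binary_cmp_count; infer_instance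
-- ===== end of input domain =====

-- B replaces A's index-based accumulator loop by a recursion on the sublist itself,
-- slicing at the middle element (alternative decomposition; slicing copies, so not faster).


-- ===== PORT A =====
-- while-loop of A as structural recursion on the interval width; a[mid] is always in
-- range on the reachable states (0 ≤ left ≤ mid ≤ right < len), so pyGetD is exact there.
def searchLoopA (a : List String) (item : String) (left right comparisons : Int) : Int :=
  if h : left ≤ right then
    let mid := PySem.Int.floordiv (left + right) 2
    let c := comparisons + 1
    let x := PySem.List.pyGetD a mid ""
    if x = item then c
    else if x < item then searchLoopA a item (mid + 1) right (c + 1)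
    else searchLoopA a item left (mid - 1) (c + 1)
  else comparisons
termination_by (right + 1 - left).toNat
decreasing_by
  · have := PySem.Int.floordiv_two_mid_bounds h; omega
  · have := PySem.Int.floordiv_two_mid_bounds h; omega

def search_binary_cmp_count (a : List String) (item : String) : Int :=
  searchLoopA a item 0 ((a.length : Int) - 1) 0

-- ===== PORT B =====
-- go(seg) of Source B: recursion on the sublist; seg[m+1:] / seg[:m] are the nonnegative
-- in-range Python slices, which coincide exactly with List.drop / List.take here.
def searchSegB (item : String) (seg : List String) : Int :=
  if h : seg = [] then 0
  else
    let m := (seg.length - 1) / 2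
    let x := seg.getD m ""
    if x = item then 1
    else if x < item then 2 + searchSegB item (seg.drop (m + 1))
    else 2 + searchSegB item (seg.take m)
termination_by seg.length
decreasing_by
  · have : seg.length ≠ 0 := fun h0 => h (List.eq_nil_of_length_eq_zero h0)
    simp [List.length_drop]; omega
  · have : seg.length ≠ 0 := fun h0 => h (List.eq_nil_of_length_eq_zero h0)
    have hm : (seg.length - 1) / 2 < seg.length := by omega
    simp [List.length_take]; omega

def search_binary_cmp_count_alt (a : List String) (item : String) : Int :=
  searchSegB item a

-- ===== PRECONDITION & SPEC =====
def Spec_search_binary_cmp_count (a : List String) (item : String) (out : Int) : Prop := out = search_binary_cmp_count_alt a item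
instance (a : List String) (item : String) (out : Int) : Decidable (Spec_search_binary_cmp_count a item out) := by unfold Spec_search_binary_cmp_count; infer_instance

-- ===== CLAIM (what is proved, stated in full; the proofs are below) =====
def Claim_equal_search_binary_cmp_count : Prop := ∀ (a : List String) (item : String), Dom_search_binary_cmp_count a item → Spec_search_binary_cmp_count a item (search_binary_cmp_count a item)

-- ===== LEMMAS AND PROOFS =====

-- loop invariant: A's loop on [left, right] equals the accumulator plus B's cost of the
-- corresponding sublist (a.drop left).take (right+1-left)
theorem searchLoopA_eq_seg (a : List String) (item : String) :
    ∀ (n : Nat) (left right c : Int), 0 ≤ left → right < (a.length : Int) →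
      (right + 1 - left).toNat = n →
      searchLoopA a item left right c
        = c + searchSegB item ((a.drop left.toNat).take n) := by
  intro n
  induction n using Nat.strong_induction_on with
  | _ n ih =>
    intro left right c hl hr hn
    rw [searchLoopA]
    by_cases h : left ≤ right
    · have hm := PySem.Int.floordiv_two_mid_bounds h
      have hfd : PySem.Int.floordiv (left + right) 2 = (left + right) / 2 := by
        simp [PySem.Int.floordiv, Int.fdiv_eq_ediv]
      set seg := (a.drop left.toNat).take n with hseg
      have hlen : seg.length = n := by
        simp [hseg, List.length_take, List.length_drop]; omega
      have hne : seg ≠ [] := by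
        intro h0; have := congrArg List.length h0; simp [hlen] at this; omega
      have hmm : (seg.length - 1) / 2 = ((PySem.Int.floordiv (left + right) 2).toNat - left.toNat) := by
        rw [hlen]; omega
      have hidx : PySem.List.pyGetD a (PySem.Int.floordiv (left + right) 2) ""
          = seg.getD ((seg.length - 1) / 2) "" := by
        have hcast : PySem.Int.floordiv (left + right) 2
            = (((PySem.Int.floordiv (left + right) 2).toNat : Nat) : Int) := by omega
        rw [hcast, PySem.List.pyGetD_natCast, hmm]
        have hlt : (PySem.Int.floordiv (left + right) 2).toNat - left.toNat < seg.length := by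
          rw [hlen]; omega
        rw [List.getD_eq_getElem _ _ hlt,
            List.getD_eq_getElem _ _ (show (PySem.Int.floordiv (left + right) 2).toNat < a.length by omega)]
        simp only [hseg, List.getElem_take, List.getElem_drop]
        congr 1
        omega
      rw [searchSegB]
      simp only [h, dif_pos, hne, dif_neg, not_false_iff, hidx]
      split_ifs with h1 h2
      · omega
      · -- go right half: seg.drop (m+1) = (a.drop (mid+1).toNat).take (n - (m+1))
        have hdrop : seg.drop ((seg.length - 1) / 2 + 1)
            = (a.drop (PySem.Int.floordiv (left + right) 2 + 1).toNat).take
                ((right + 1 - (PySem.Int.floordiv (left + right) 2 + 1)).toNat) := by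
          rw [hlen]
          simp only [hseg, List.drop_take, List.drop_drop]
          congr 1
          all_goals (try congr 1)
          all_goals omega
        rw [ih ((right + 1 - (PySem.Int.floordiv (left + right) 2 + 1)).toNat)
            (by omega) _ _ (c + 1 + 1) (by omega) hr rfl, ← hdrop]
        omega
      · -- go left half: seg.take m = (a.drop left.toNat).take m, m = (mid-1+1-left).toNat
        have htake : seg.take ((seg.length - 1) / 2)
            = (a.drop left.toNat).take ((PySem.Int.floordiv (left + right) 2 - 1 + 1 - left).toNat) := by
          rw [hlen]
          simp only [hseg, List.take_take]
          congr 1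
          omega
        rw [ih ((PySem.Int.floordiv (left + right) 2 - 1 + 1 - left).toNat)
            (by omega) _ _ (c + 1 + 1) hl (by omega) rfl, ← htake]
        omega
    · have hn0 : n = 0 := by omega
      simp only [h, dif_neg, not_false_iff, hn0, List.take_zero]
      rw [searchSegB]; simp

-- ===== VERDICT (by name: the statement is the Claim_ definition above) =====
theorem search_binary_cmp_count_spec : Claim_equal_search_binary_cmp_count := by
  intro a item _
  unfold Spec_search_binary_cmp_count search_binary_cmp_count search_binary_cmp_count_alt
  rw [searchLoopA_eq_seg a item a.length 0 ((a.length : Int) - 1) 0 le_rfl (by omega) (by omega)]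
  simp
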